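-- pv_equiv track=rewrite | github.com/ysparrk/Algorithm | 프로그래머스/3/43238. 입국심사/입국심사.py | solution
-- ===== SOURCE A (Python) =====
-- def solution(n, times):
--     rlt = 0
--     left = 1
--     right = max(times) * n
--
--
--     while left <= right:
--         mid = (left + right) // 2
--
--         # mid 시간 동안 얼마나 줄을 설 수 있는지 구하기
--         cnt = 0
--         for t in times:
--             # 심사 받은 수 더하기
--             cnt += mid // t
--
--             # mid 동안 n명 이상의 심사를 할 수 있다면 반복문 나가기(통과)
--             if cnt >= n:
--                 break
--
--         if cnt >= n:
--             rlt = mid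
--             right = mid - 1
--
--         else:
--             left = mid + 1
--
--
--     return rlt
-- ===== SOURCE B (Python) =====
-- import heapq
-- from fractions import Fraction
--
--
-- def solution(n, times):
--     # Jump analytically to x0 = floor((n-1)/rate), by when at most n-1 people
--     # are served, then lazily merge the counters' remaining schedules
--     # (next multiple of t after x0, then +t each pop) with a min-heap;
--     # the (n - served)-th popped finish time is the answer.
--     if n <= 0:
--         return 0
--     rate = sum(Fraction(1, t) for t in times)            # people per unit time
--     x0 = (n - 1) * rate.denominator // rate.numerator    # serves <= n - 1 people
--     served = sum(x0 // t for t in times)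
--     heap = [(x0 + t - x0 % t, t) for t in times]         # next finish after x0
--     heapq.heapify(heap)
--     cur = x0
--     for _ in range(n - served):
--         cur, t = heapq.heappop(heap)
--         heapq.heappush(heap, (cur + t, t))
--     return cur
-- ===== Notes on version B (the rewrite author's own statement) =====
-- stated objective: alternative
-- what changed: Replaced the binary search over the answer by an analytic jump to x0 = floor((n-1)/rate) (rate = sum of 1/t, exact Fractions) followed by a lazy min-heap merge of the counters' remaining schedules x0+..., popping the remaining n - served finish times.
-- outside the precondition, e.g. on solution(2, [-3]): A returns 0, B returns -6; on solution(1, [1, 0]): A returns 1, B raises ZeroDivisionError; on solution(-1, [-2]): A returns 1, B returns 0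
import Mathlib
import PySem

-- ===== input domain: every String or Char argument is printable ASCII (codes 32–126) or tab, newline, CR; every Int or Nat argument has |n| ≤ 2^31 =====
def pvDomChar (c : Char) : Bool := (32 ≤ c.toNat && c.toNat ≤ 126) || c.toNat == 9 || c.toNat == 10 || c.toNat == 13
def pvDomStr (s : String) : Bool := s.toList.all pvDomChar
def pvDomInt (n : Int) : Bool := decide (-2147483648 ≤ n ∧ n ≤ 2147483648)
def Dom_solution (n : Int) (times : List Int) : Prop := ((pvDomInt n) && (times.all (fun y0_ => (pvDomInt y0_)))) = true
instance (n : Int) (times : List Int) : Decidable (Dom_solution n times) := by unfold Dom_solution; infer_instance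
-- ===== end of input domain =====

-- B replaces A's binary search over the answer by an analytic jump to
-- x0 = floor((n-1)/rate) followed by a lazy min-heap merge of the counters'
-- remaining schedules (the (n - served)-th popped finish time); alternative
-- algorithm, proved to return the same value.

-- ===== PORT A =====
-- the inner 'for t in times: cnt += mid // t; if cnt >= n: break' loop
def acnt (n : Int) (mid : Int) : List Int → Int → Int
  | [], cnt => cnt
  | t :: ts, cnt =>
    let cnt' := cnt + PySem.Int.floordiv mid t
    if n ≤ cnt' then cnt' else acnt n mid ts cnt'

-- the 'while left <= right' binary-search loop
def aloop (n : Int) (times : List Int) (rlt left right : Int) : Int :=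
  if h : left ≤ right then
    let mid := PySem.Int.floordiv (left + right) 2
    let cnt := acnt n mid times 0
    if n ≤ cnt then aloop n times mid left (mid - 1)
    else aloop n times rlt (mid + 1) right
  else rlt
termination_by (right + 1 - left).toNat
decreasing_by
  · have := PySem.Int.floordiv_two_mid_bounds h; omega
  · have := PySem.Int.floordiv_two_mid_bounds h; omega

def solution (n : Int) (times : List Int) : Int :=
  match PySem.List.max? times (fun x => x) with
  | none => 0   -- max(times) raises ValueError on []; excluded by Pre_solution
  | some m => aloop n times 0 1 (m * n)

-- ===== PORT B =====
-- heapq compares tuples lexicographically; the heap is modelled as a multiset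
-- list: heappop = remove the (first) lexicographic minimum, heappush = append.
def lexLt (a b : Int × Int) : Bool := a.1 < b.1 || (a.1 == b.1 && a.2 < b.2)

def findMin : List (Int × Int) → Option (Int × Int)
  | [] => none
  | x :: xs =>
    match findMin xs with
    | none => some x
    | some m => if lexLt m x then some m else some x

def removeFirst (p : Int × Int) : List (Int × Int) → List (Int × Int)
  | [] => []
  | x :: xs => if x = p then xs else x :: removeFirst p xs

-- 'for _ in range(n): cur, t = heappop(heap); heappush(heap, (cur + t, t))'
def bloop : Nat → Int → List (Int × Int) → Int
  | 0, cur, _ => cur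
  | k + 1, cur, heap =>
    match findMin heap with
    | none => cur   -- heappop on an empty heap; unreachable under Pre_solution
    | some (c, t) => bloop k c (removeFirst (c, t) heap ++ [(c + t, t)])

-- rate = sum(Fraction(1, t) for t in times); Lean's Rat is normalised exactly
-- like Python's Fraction, so .num/.den match numerator/denominator.
def rateOf (times : List Int) : ℚ := (times.map (fun t : Int => (1 : ℚ) / (t : ℚ))).sum

def solution_alt (n : Int) (times : List Int) : Int :=
  if n ≤ 0 then 0
  else
    let rate := rateOf times
    let x0 := PySem.Int.floordiv ((n - 1) * (rate.den : Int)) rate.num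
    let served := (times.map (fun t => PySem.Int.floordiv x0 t)).sum
    let heap := times.map (fun t => (x0 + t - PySem.Int.mod x0 t, t))
    bloop (n - served).toNat x0 heap

-- ===== PRECONDITION & SPEC =====
-- Pre_ excludes the empty list (max([]) raises ValueError) and lists containing a
-- nonpositive time except when the search interval is trivially empty (n = 0, or
-- n < 0 with some positive time): on the excluded inputs A divides by zero or its
-- degenerate search bounds yield the accidental value 0.
def Pre_solution (n : Int) (times : List Int) : Prop :=
  times ≠ [] ∧ ((∀ t ∈ times, 1 ≤ t) ∨ n = 0 ∨ (n ≤ 0 ∧ ∃ t ∈ times, 1 ≤ t))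
instance (n : Int) (times : List Int) : Decidable (Pre_solution n times) := by
  unfold Pre_solution; infer_instance

def pvWitness_solution : Int × List Int := (6, [7, 10])

def Spec_solution (n : Int) (times : List Int) (out : Int) : Prop := out = solution_alt n times
instance (n : Int) (times : List Int) (out : Int) : Decidable (Spec_solution n times out) := by unfold Spec_solution; infer_instance

-- ===== CLAIM (what is proved, stated in full; the proofs are below) =====
def Claim_equal_solution : Prop := ∀ (n : Int) (times : List Int), Dom_solution n times → Pre_solution n times → Spec_solution n times (solution n times)

-- ===== LEMMAS AND PROOFS =====

-- number of elements of the schedule c, c+t, c+2t, … that are ≤ x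
def term_ (x : Int) (p : Int × Int) : Int :=
  max 0 (PySem.Int.floordiv x p.2 - PySem.Int.floordiv p.1 p.2 + 1)

def fheap (h : List (Int × Int)) (x : Int) : Int := (h.map (term_ x)).sum

def sumDiv (times : List Int) (x : Int) : Int :=
  (times.map (fun t => PySem.Int.floordiv x t)).sum

-- every heap entry (c, t) has t ≥ 1 and c a positive multiple of t
def HInv (h : List (Int × Int)) : Prop :=
  ∀ p ∈ h, 1 ≤ p.2 ∧ ∃ m : Int, 1 ≤ m ∧ p.1 = m * p.2

-- ---- floor-division facts ----
lemma fd_mul_self {m t : Int} (ht : 0 < t) : PySem.Int.floordiv (m * t) t = m := by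
  rw [PySem.Int.floordiv_eq_iff_of_pos ht]
  constructor
  · exact le_rfl
  · nlinarith

lemma fd_mono {x y t : Int} (ht : 0 < t) (hxy : x ≤ y) :
    PySem.Int.floordiv x t ≤ PySem.Int.floordiv y t := by
  have h1 : PySem.Int.floordiv x t * t ≤ x := (PySem.Int.le_floordiv_iff_mul_le ht).mp le_rfl
  exact (PySem.Int.le_floordiv_iff_mul_le ht).mpr (h1.trans hxy)

lemma fd_le_iff {c x t : Int} (ht : 0 < t) (hd : t ∣ c) :
    c ≤ x ↔ PySem.Int.floordiv c t ≤ PySem.Int.floordiv x t := by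
  obtain ⟨m, rfl⟩ := hd
  rw [mul_comm, fd_mul_self ht, PySem.Int.le_floordiv_iff_mul_le ht, mul_comm]

lemma fd_nonneg {x t : Int} (ht : 0 < t) (hx : 0 ≤ x) : 0 ≤ PySem.Int.floordiv x t := by
  rw [PySem.Int.le_floordiv_iff_mul_le ht]; simpa using hx

-- ---- counting-loop characterisation (A's inner loop with break) ----
lemma sumDiv_nonneg {times : List Int} {x : Int} (hts : ∀ t ∈ times, 1 ≤ t) (hx : 0 ≤ x) :
    0 ≤ sumDiv times x := by
  apply List.sum_nonneg
  intro a ha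
  obtain ⟨t, ht, rfl⟩ := List.mem_map.mp ha
  exact fd_nonneg (by have := hts t ht; omega) hx

lemma sumDiv_mono {times : List Int} {x y : Int} (hts : ∀ t ∈ times, 1 ≤ t) (hxy : x ≤ y) :
    sumDiv times x ≤ sumDiv times y := by
  unfold sumDiv
  apply List.sum_le_sum
  intro t ht
  exact fd_mono (by have := hts t ht; omega) hxy

lemma acnt_ge_iff {n mid : Int} : ∀ {ts : List Int} {cnt : Int}, (∀ t ∈ ts, 1 ≤ t) → 0 ≤ mid →
    (n ≤ acnt n mid ts cnt ↔ n ≤ cnt + sumDiv ts mid) := by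
  intro ts
  induction ts with
  | nil => intro cnt _ _; simp [acnt, sumDiv]
  | cons t ts ih =>
    intro cnt hts hmid
    have ht : (1:Int) ≤ t := hts t (by simp)
    have hts' : ∀ u ∈ ts, (1:Int) ≤ u := fun u hu => hts u (by simp [hu])
    have hfd : 0 ≤ PySem.Int.floordiv mid t := fd_nonneg (by omega) hmid
    simp only [acnt]
    split_ifs with h
    · have h2 : 0 ≤ sumDiv ts mid := sumDiv_nonneg hts' hmid
      simp only [sumDiv, List.map_cons, List.sum_cons] at *
      constructor <;> intro <;> omega
    · rw [ih hts' hmid]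
      simp only [sumDiv, List.map_cons, List.sum_cons]
      constructor <;> intro <;> omega

-- ---- fheap facts ----
lemma term_nonneg (x : Int) (p : Int × Int) : 0 ≤ term_ x p := by
  simp [term_]

lemma fheap_nonneg (h : List (Int × Int)) (x : Int) : 0 ≤ fheap h x :=
  List.sum_nonneg (by intro a ha; obtain ⟨p, _, rfl⟩ := List.mem_map.mp ha; exact term_nonneg x p)

lemma term_eq_zero_of_lt {x : Int} {p : Int × Int} (ht : 1 ≤ p.2)
    (hd : p.2 ∣ p.1) (hx : x < p.1) : term_ x p = 0 := by
  have : ¬ (PySem.Int.floordiv p.1 p.2 ≤ PySem.Int.floordiv x p.2) := by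
    rw [← fd_le_iff (by omega) hd]; omega
  simp only [term_]; omega

lemma fheap_eq_zero {h : List (Int × Int)} {x : Int}
    (hz : ∀ p ∈ h, term_ x p = 0) : fheap h x = 0 := by
  apply List.sum_eq_zero
  intro a ha
  obtain ⟨p, hp, rfl⟩ := List.mem_map.mp ha
  exact hz p hp

lemma fheap_zero_of_lt_min {h : List (Int × Int)} {c0 x : Int}
    (hinv : HInv h) (hmin : ∀ p ∈ h, c0 ≤ p.1) (hx : x < c0) : fheap h x = 0 := by
  apply fheap_eq_zero
  intro p hp
  obtain ⟨ht, m, hm, hc⟩ := hinv p hp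
  exact term_eq_zero_of_lt ht ⟨m, by rw [hc, mul_comm]⟩ (lt_of_lt_of_le hx (hmin p hp))

lemma fheap_removeFirst {p : Int × Int} : ∀ {h : List (Int × Int)}, p ∈ h →
    ∀ x, fheap h x = term_ x p + fheap (removeFirst p h) x := by
  intro h
  induction h with
  | nil => simp
  | cons q h ih =>
    intro hp x
    by_cases hqp : q = p
    · subst hqp; simp [fheap, removeFirst]
    · have hp' : p ∈ h := by
        cases List.mem_cons.mp hp with
        | inl h1 => exact absurd h1.symm hqp
        | inr h1 => exact h1
      simp only [fheap, removeFirst, if_neg hqp, List.map_cons, List.sum_cons]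
      have hrec := ih hp' x
      simp only [fheap] at hrec
      rw [hrec]; ring

lemma removeFirst_subset {p q : Int × Int} : ∀ {h : List (Int × Int)},
    q ∈ removeFirst p h → q ∈ h := by
  intro h
  induction h with
  | nil => simp [removeFirst]
  | cons r h ih =>
    simp only [removeFirst]
    split_ifs with hr
    · intro hq; exact List.mem_cons.mpr (Or.inr hq)
    · intro hq
      rcases List.mem_cons.mp hq with h1 | h1
      · simp [h1]
      · exact List.mem_cons.mpr (Or.inr (ih h1))

lemma fheap_append (l : List (Int × Int)) (p : Int × Int) (x : Int) :
    fheap (l ++ [p]) x = fheap l x + term_ x p := by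
  simp [fheap]

lemma term_push {c t x : Int} (ht : 1 ≤ t) (hd : t ∣ c) :
    term_ x (c + t, t) = term_ x (c, t) - (if c ≤ x then 1 else 0) := by
  have ht' : (0:Int) < t := by omega
  obtain ⟨m, rfl⟩ := hd
  have h1 : PySem.Int.floordiv (t * m) t = m := by rw [mul_comm]; exact fd_mul_self ht'
  have h2 : PySem.Int.floordiv (t * m + t) t = m + 1 := by
    have : t * m + t = (m + 1) * t := by ring
    rw [this]; exact fd_mul_self ht'
  have h3 : t * m ≤ x ↔ m ≤ PySem.Int.floordiv x t := by
    have := fd_le_iff (c := t * m) (x := x) ht' ⟨m, rfl⟩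
    rw [this, h1]
  simp only [term_, h1, h2]
  by_cases hcx : t * m ≤ x
  · have := h3.mp hcx
    rw [if_pos hcx]; omega
  · have := h3
    rw [if_neg hcx]; omega

-- ---- findMin facts ----
lemma findMin_eq_none_iff {h : List (Int × Int)} : findMin h = none ↔ h = [] := by
  cases h with
  | nil => simp [findMin]
  | cons x xs =>
    simp only [findMin]
    cases findMin xs <;> simp <;> split_ifs <;> simp

lemma findMin_mem : ∀ {h : List (Int × Int)} {p : Int × Int}, findMin h = some p → p ∈ h := by
  intro h
  induction h with
  | nil => simp [findMin]
  | cons x xs ih =>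
    intro p he
    rw [findMin] at he
    cases hm : findMin xs with
    | none => rw [hm] at he; simp at he; simp [he]
    | some m =>
      rw [hm] at he
      simp only at he
      split_ifs at he with hlt
      · simp at he; subst he; exact List.mem_cons.mpr (Or.inr (ih hm))
      · simp at he; simp [he]

lemma findMin_min : ∀ {h : List (Int × Int)} {p : Int × Int}, findMin h = some p →
    ∀ q ∈ h, p.1 ≤ q.1 := by
  intro h
  induction h with
  | nil => simp [findMin]
  | cons x xs ih =>
    intro p he q hq
    rw [findMin] at he
    cases hm : findMin xs with
    | none =>
      rw [hm] at he
      simp at he; subst he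
      have : xs = [] := findMin_eq_none_iff.mp hm
      subst this; simp at hq; simp [hq]
    | some m =>
      rw [hm] at he
      simp only [lexLt] at he
      rcases List.mem_cons.mp hq with h1 | h1
      · subst h1
        split_ifs at he with hlt
        · simp at he; subst he
          simp only [Bool.or_eq_true, decide_eq_true_eq, Bool.and_eq_true, beq_iff_eq] at hlt
          omega
        · simp at he; subst he; exact le_rfl
      · have hmq : m.1 ≤ q.1 := ih hm q h1
        split_ifs at he with hlt
        · simp at he; subst he; exact hmq
        · simp at he; subst he
          simp only [Bool.or_eq_true, decide_eq_true_eq, Bool.and_eq_true, beq_iff_eq,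
            not_or, not_and] at hlt
          omega

-- ---- the heap loop returns the least x with fheap h x ≥ k+1 ----
lemma bloop_good : ∀ (k : Nat) (h : List (Int × Int)) (cur : Int), h ≠ [] → HInv h →
    ((k + 1 : Int) ≤ fheap h (bloop (k + 1) cur h)) ∧
    (∀ x, (k + 1 : Int) ≤ fheap h x → bloop (k + 1) cur h ≤ x) := by
  intro k
  induction k with
  | zero =>
    intro h cur hne hinv
    obtain ⟨p, hp⟩ := Option.ne_none_iff_exists'.mp (fun hn => hne (findMin_eq_none_iff.mp hn))
    obtain ⟨c0, t0⟩ := p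
    have hmem : (c0, t0) ∈ h := findMin_mem hp
    have hmin : ∀ q ∈ h, c0 ≤ q.1 := findMin_min hp
    have hres : bloop 1 cur h = c0 := by simp [bloop, hp]
    rw [hres]
    obtain ⟨ht0, m, hm, hc0⟩ := hinv (c0, t0) hmem
    simp only at ht0 hc0
    constructor
    · have h1 : term_ c0 (c0, t0) = 1 := by simp [term_]
      have h2 := fheap_removeFirst hmem c0
      have h3 := fheap_nonneg (removeFirst (c0, t0) h) c0
      omega
    · intro x hx
      by_contra hlt
      push_neg at hlt
      have := fheap_zero_of_lt_min hinv hmin hlt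
      omega
  | succ k ih =>
    intro h cur hne hinv
    obtain ⟨p, hp⟩ := Option.ne_none_iff_exists'.mp (fun hn => hne (findMin_eq_none_iff.mp hn))
    obtain ⟨c0, t0⟩ := p
    have hmem : (c0, t0) ∈ h := findMin_mem hp
    have hmin : ∀ q ∈ h, c0 ≤ q.1 := findMin_min hp
    obtain ⟨ht0, m, hm, hc0⟩ := hinv (c0, t0) hmem
    simp only at ht0 hc0
    set h' := removeFirst (c0, t0) h ++ [(c0 + t0, t0)] with hh'
    have hres : bloop (k + 1 + 1) cur h = bloop (k + 1) c0 h' := by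
      rw [hh']; simp [bloop, hp]
    have hne' : h' ≠ [] := by simp [hh']
    have hinv' : HInv h' := by
      intro q hq
      rcases List.mem_append.mp hq with h1 | h1
      · exact hinv q (removeFirst_subset h1)
      · simp at h1; subst h1
        exact ⟨ht0, m + 1, by constructor; omega; rw [hc0]; ring⟩
    have hdvd : t0 ∣ c0 := ⟨m, by rw [hc0, mul_comm]⟩
    -- the pop/push identity
    have hid : ∀ x, fheap h' x = fheap h x - (if c0 ≤ x then 1 else 0) := by
      intro x
      rw [hh', fheap_append, term_push ht0 hdvd, fheap_removeFirst hmem x]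
      ring
    obtain ⟨ihge, ihmin⟩ := ih h' c0 hne' hinv'
    set v := bloop (k + 1) c0 h' with hv
    rw [hres]
    have hc0v : c0 ≤ v := by
      by_contra hlt
      push_neg at hlt
      have h0 : fheap h v = 0 := fheap_zero_of_lt_min hinv hmin hlt
      have := hid v
      rw [if_neg (by omega)] at this
      omega
    constructor
    · have := hid v
      rw [if_pos hc0v] at this
      omega
    · intro x hx
      by_cases hcx : c0 ≤ x
      · apply ihmin
        have := hid x
        rw [if_pos hcx] at this
        omega
      · exfalso
        have h0 : fheap h x = 0 := fheap_zero_of_lt_min hinv hmin (by omega)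
        omega

-- ---- initial heap after the jump: fheap counts schedule points beyond x0 ----
lemma heap_entry_eq {x0 t : Int} :
    x0 + t - PySem.Int.mod x0 t = (PySem.Int.floordiv x0 t + 1) * t := by
  have h := PySem.Int.floordiv_mul_add_mod x0 t
  linear_combination -h

lemma fheap_init {times : List Int} {x0 x : Int} (hts : ∀ t ∈ times, 1 ≤ t) :
    (x0 ≤ x → fheap (times.map (fun t => (x0 + t - PySem.Int.mod x0 t, t))) x
        = sumDiv times x - sumDiv times x0)
    ∧ (x ≤ x0 → fheap (times.map (fun t => (x0 + t - PySem.Int.mod x0 t, t))) x = 0) := by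
  induction times with
  | nil => simp [fheap, sumDiv]
  | cons t ts ih =>
    have ht : (1:Int) ≤ t := hts t (by simp)
    have hts' : ∀ u ∈ ts, (1:Int) ≤ u := fun u hu => hts u (by simp [hu])
    have hfdc : PySem.Int.floordiv (x0 + t - PySem.Int.mod x0 t) t
        = PySem.Int.floordiv x0 t + 1 := by
      rw [heap_entry_eq]; exact fd_mul_self (by omega)
    obtain ⟨ih1, ih2⟩ := ih hts'
    constructor
    · intro hx
      have hmono := fd_mono (x := x0) (y := x) (t := t) (by omega) hx
      simp only [fheap, sumDiv, List.map_cons, List.sum_cons] at *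
      rw [ih1 hx]
      simp only [term_, hfdc]
      omega
    · intro hx
      have hmono := fd_mono (x := x) (y := x0) (t := t) (by omega) hx
      simp only [fheap, sumDiv, List.map_cons, List.sum_cons] at *
      rw [ih2 hx]
      simp only [term_, hfdc]
      omega

-- ---- the analytic jump serves at most n - 1 people ----
lemma rate_pos {times : List Int} (hne : times ≠ []) (hts : ∀ t ∈ times, 1 ≤ t) :
    0 < rateOf times := by
  apply List.sum_pos
  · intro q hq
    obtain ⟨t, ht, rfl⟩ := List.mem_map.mp hq
    have : (0:ℚ) < (t:ℚ) := by exact_mod_cast (by have := hts t ht; omega : (0:Int) < t)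
    positivity
  · intro h
    exact hne (List.map_eq_nil_iff.mp h)

lemma served_le {n : Int} {times : List Int} (hne : times ≠ []) (hts : ∀ t ∈ times, 1 ≤ t)
    (hn : 1 ≤ n) :
    sumDiv times (PySem.Int.floordiv ((n - 1) * ((rateOf times).den : Int)) (rateOf times).num)
      ≤ n - 1 := by
  set S := rateOf times with hS
  have hSpos : 0 < S := rate_pos hne hts
  have hnum : 0 < S.num := Rat.num_pos.mpr hSpos
  set x0 := PySem.Int.floordiv ((n - 1) * (S.den : Int)) S.num with hx0def
  have hfd : x0 * S.num ≤ (n - 1) * (S.den : Int) :=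
    (PySem.Int.le_floordiv_iff_mul_le hnum).mp le_rfl
  have hden : (0:ℚ) < (S.den : ℚ) := by
    have := S.den_pos
    exact_mod_cast this
  have hx0S : (x0 : ℚ) * S ≤ (n : ℚ) - 1 := by
    rw [← Rat.num_div_den S, mul_div_assoc', div_le_iff₀ hden]
    have : ((x0 * S.num : Int) : ℚ) ≤ (((n - 1) * (S.den : Int) : Int) : ℚ) := by
      exact_mod_cast hfd
    push_cast at this ⊢
    linarith
  have hcast : ((sumDiv times x0 : Int) : ℚ)
      = ((times.map (fun t => PySem.Int.floordiv x0 t)).map (fun z => ((z : Int) : ℚ))).sum := by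
    simp [sumDiv, Int.cast_list_sum]
  have hsum_le : ((times.map (fun t => PySem.Int.floordiv x0 t)).map (fun z => ((z : Int) : ℚ))).sum
      ≤ (x0 : ℚ) * S := by
    rw [hS]
    unfold rateOf
    rw [← List.sum_map_mul_left, List.map_map]
    apply List.sum_le_sum
    intro t ht
    have ht1 : (1:Int) ≤ t := hts t ht
    have htq : (0:ℚ) < (t:ℚ) := by exact_mod_cast (by omega : (0:Int) < t)
    simp only [Function.comp]
    rw [mul_one_div, le_div_iff₀ htq]
    have : PySem.Int.floordiv x0 t * t ≤ x0 :=
      (PySem.Int.le_floordiv_iff_mul_le (by omega)).mp le_rfl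
    exact_mod_cast this
  have : ((sumDiv times x0 : Int) : ℚ) ≤ (n : ℚ) - 1 := by
    rw [hcast]; exact le_trans hsum_le hx0S
  have : ((sumDiv times x0 : Int) : ℚ) ≤ (((n - 1 : Int)) : ℚ) := by push_cast; linarith
  exact_mod_cast this

-- ---- the binary search returns the same least element ----
lemma aloop_eq {n v : Int} {times : List Int} (hts : ∀ t ∈ times, 1 ≤ t)
    (hv1 : 1 ≤ v) (hv2 : n ≤ sumDiv times v)
    (hv3 : ∀ x, 1 ≤ x → n ≤ sumDiv times x → v ≤ x) {ub : Int} (hub : v ≤ ub) :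
    ∀ (fuel : Nat) (rlt left right : Int), (right + 1 - left).toNat ≤ fuel →
      1 ≤ left → left ≤ v → v ≤ right + 1 →
      ((rlt = 0 ∧ right = ub) ∨ rlt = right + 1) →
      aloop n times rlt left right = v := by
  intro fuel
  induction fuel with
  | zero =>
    intro rlt left right hf h1 h2 h3 h4
    have hlr : ¬ (left ≤ right) := by omega
    rw [aloop, dif_neg hlr]
    rcases h4 with ⟨_, hre⟩ | hre
    · omega
    · omega
  | succ fuel ih =>
    intro rlt left right hf h1 h2 h3 h4
    by_cases hlr : left ≤ right
    · rw [aloop, dif_pos hlr]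
      simp only
      have hmid := PySem.Int.floordiv_two_mid_bounds hlr
      set mid := PySem.Int.floordiv (left + right) 2 with hmiddef
      have hmid1 : (1:Int) ≤ mid := by omega
      have hcnt := acnt_ge_iff (n := n) (mid := mid) (cnt := 0) hts (by omega)
      rw [zero_add] at hcnt
      split_ifs with hc
      · -- enough: go left, record mid
        have hvmid : v ≤ mid := hv3 mid hmid1 (hcnt.mp hc)
        exact ih mid left (mid - 1) (by omega) h1 h2 (by omega) (by omega)
      · -- not enough: mid < v
        have hnm : ¬ (n ≤ sumDiv times mid) := fun hn => hc (hcnt.mpr hn)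
        have hmv : mid < v := by
          by_contra hle
          push_neg at hle
          exact hnm (le_trans hv2 (sumDiv_mono hts hle))
        refine ih rlt (mid + 1) right (by omega) (by omega) (by omega) h3 ?_
        rcases h4 with h | h
        · exact Or.inl h
        · exact Or.inr h
    · rw [aloop, dif_neg hlr]
      rcases h4 with ⟨_, hre⟩ | hre
      · omega
      · omega

-- ===== VERDICT (by name: the statement is the Claim_ definition above) =====
theorem solution_spec : Claim_equal_solution := by
  intro n times _ hpre
  obtain ⟨hne, hrest⟩ := hpre
  unfold Spec_solution
  obtain ⟨m, hm⟩ := Option.ne_none_iff_exists'.mp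
    (fun hn => hne ((PySem.List.max?_eq_none_iff times (fun x => x)).mp hn))
  have hmmem : m ∈ times := PySem.List.max?_mem hm
  have hsol : solution n times = aloop n times 0 1 (m * n) := by
    simp [solution, hm]
  rw [hsol]
  by_cases hn : n ≤ 0
  · -- both sides trivially return 0
    have hB0 : solution_alt n times = 0 := by simp [solution_alt, if_pos hn]
    rw [hB0]
    have hmn : m * n ≤ 0 := by
      rcases hrest with hts | hz | ⟨_, t, ht, ht1⟩
      · have : (1:Int) ≤ m := hts m hmmem
        exact mul_nonpos_iff.mpr (Or.inl ⟨by omega, hn⟩)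
      · have : m * n = 0 := by rw [hz]; ring
        omega
      · have : (1:Int) ≤ m := le_trans ht1 (PySem.List.max?_isMax hm t ht)
        exact mul_nonpos_iff.mpr (Or.inl ⟨by omega, hn⟩)
    rw [aloop, dif_neg (by omega)]
  · push_neg at hn
    have hn1 : (1:Int) ≤ n := hn
    have hts : ∀ t ∈ times, (1:Int) ≤ t := by
      rcases hrest with hts | hz | ⟨hneg, _⟩
      · exact hts
      · omega
      · omega
    have hm1 : (1:Int) ≤ m := hts m hmmem
    -- B's value after the analytic jump
    set S := rateOf times with hSdef
    have hSpos : 0 < S := rate_pos hne hts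
    have hnum : 0 < S.num := Rat.num_pos.mpr hSpos
    set x0 := PySem.Int.floordiv ((n - 1) * (S.den : Int)) S.num with hx0def
    have hx0 : 0 ≤ x0 := by
      rw [hx0def, PySem.Int.le_floordiv_iff_mul_le hnum]
      have : 0 ≤ (n - 1) * (S.den : Int) := mul_nonneg (by omega) (by positivity)
      omega
    set served := sumDiv times x0 with hserveddef
    have hserved : served ≤ n - 1 := served_le hne hts hn1
    set h0 := times.map (fun t => (x0 + t - PySem.Int.mod x0 t, t)) with hh0
    have halt : solution_alt n times = bloop (n - served).toNat x0 h0 := by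
      simp only [solution_alt, if_neg (by omega : ¬ n ≤ 0)]
      rw [← hSdef, ← hx0def, ← hh0]
      rfl
    rw [halt]
    have hne0 : h0 ≠ [] := by simpa [hh0] using hne
    have hinv0 : HInv h0 := by
      intro p hp
      rw [hh0] at hp
      obtain ⟨t, ht, rfl⟩ := List.mem_map.mp hp
      have ht1 : (1:Int) ≤ t := hts t ht
      refine ⟨ht1, PySem.Int.floordiv x0 t + 1, ?_, heap_entry_eq⟩
      have := fd_nonneg (x := x0) (t := t) (by omega) hx0
      omega
    obtain ⟨k, hk⟩ : ∃ k : Nat, (n - served).toNat = k + 1 := ⟨(n - served).toNat - 1, by omega⟩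
    have hkcast : ((k:Int) + 1) = n - served := by omega
    obtain ⟨hge, hmin⟩ := bloop_good k h0 x0 hne0 hinv0
    rw [hkcast] at hge hmin
    rw [hk]
    set v := bloop (k + 1) x0 h0 with hvdef
    -- translate fheap to sumDiv
    have hinit := fun x => fheap_init (times := times) (x0 := x0) (x := x) hts
    have hvx0 : x0 + 1 ≤ v := by
      by_contra hle
      push_neg at hle
      have := (hinit v).2 (by omega)
      rw [← hh0] at this
      omega
    have hv1 : 1 ≤ v := by omega
    have hv2 : n ≤ sumDiv times v := by
      have := (hinit v).1 (by omega)
      rw [← hh0, ← hserveddef] at this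
      omega
    have hv3 : ∀ x, 1 ≤ x → n ≤ sumDiv times x → v ≤ x := by
      intro x hx hnx
      apply hmin
      by_cases hxx0 : x0 ≤ x
      · have := (hinit x).1 hxx0
        rw [← hh0, ← hserveddef] at this
        omega
      · exfalso
        have := sumDiv_mono (x := x) (y := x0) hts (by omega)
        omega
    -- the upper bound max(times) * n satisfies the predicate
    have hub0 : 0 ≤ m * n := mul_nonneg (by omega) (by omega)
    have hubmem : PySem.Int.floordiv (m * n) m ∈ times.map (fun t => PySem.Int.floordiv (m * n) t) :=
      List.mem_map_of_mem hmmem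
    have hubterm : PySem.Int.floordiv (m * n) m = n := by
      rw [mul_comm]; exact fd_mul_self (by omega)
    have hubsum : n ≤ sumDiv times (m * n) := by
      have hall : ∀ a ∈ times.map (fun t => PySem.Int.floordiv (m * n) t), (0:Int) ≤ a := by
        intro a ha
        obtain ⟨t, ht, rfl⟩ := List.mem_map.mp ha
        exact fd_nonneg (by have := hts t ht; omega) hub0
      have := List.single_le_sum hall _ hubmem
      rw [hubterm] at this
      exact this
    have hub : v ≤ m * n := hv3 (m * n) (by nlinarith) hubsum
    exact aloop_eq hts hv1 hv2 hv3 hub ((m * n + 1 - 1).toNat) 0 1 (m * n)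
      (by omega) le_rfl hv1 (by omega) (Or.inl ⟨rfl, rfl⟩)
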